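-- pv_equiv track=rewrite | github.com/matu6968/buyeuropean-desktop | src/buyeuropean/ui/gtk/app.py | escape_markup
-- ===== SOURCE A (Python) =====
-- def escape_markup(text):
--     """Escape special characters for GTK markup.
--
--     Args:
--         text: Text to escape
--
--     Returns:
--         Escaped text safe for use in GTK markup
--     """
--     if not text:
--         return ""
--
--     # Convert the text to string if it's not already
--     if not isinstance(text, str):
--         text = str(text)
--
--     # Replace special characters with their escaped versions
--     replacements = [
--         ('&', '&amp;'),   # This must be first to avoid double-escaping
--         ('<', '&lt;'),
--         ('>', '&gt;'),
--         ("'", '&apos;'),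
--         ('"', '&quot;'),
--     ]
--
--     for old, new in replacements:
--         text = text.replace(old, new)
--
--     return text
-- ===== SOURCE B (Python) =====
-- def escape_markup(text):
--     """Escape special characters for GTK markup.
--
--     Single pass: a lookup table maps each special character to its entity;
--     every character is translated once, instead of five full .replace passes.
--     """
--     if not text:
--         return ""
--
--     if not isinstance(text, str):
--         text = str(text)
--
--     table = {
--         '&': '&amp;',
--         '<': '&lt;',
--         '>': '&gt;',
--         "'": '&apos;',
--         '"': '&quot;',
--     }
--
--     parts = []
--     for ch in text:
--         parts.append(table.get(ch, ch))
--     return ''.join(parts)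
-- ===== Notes on version B (the rewrite author's own statement) =====
-- stated objective: alternative
-- what changed: Replaces five sequential full-string .replace passes with a single pass over the characters using a lookup table, joining the escaped pieces once; fewer passes but Python-level looping, so no speed claim.
import Mathlib
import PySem

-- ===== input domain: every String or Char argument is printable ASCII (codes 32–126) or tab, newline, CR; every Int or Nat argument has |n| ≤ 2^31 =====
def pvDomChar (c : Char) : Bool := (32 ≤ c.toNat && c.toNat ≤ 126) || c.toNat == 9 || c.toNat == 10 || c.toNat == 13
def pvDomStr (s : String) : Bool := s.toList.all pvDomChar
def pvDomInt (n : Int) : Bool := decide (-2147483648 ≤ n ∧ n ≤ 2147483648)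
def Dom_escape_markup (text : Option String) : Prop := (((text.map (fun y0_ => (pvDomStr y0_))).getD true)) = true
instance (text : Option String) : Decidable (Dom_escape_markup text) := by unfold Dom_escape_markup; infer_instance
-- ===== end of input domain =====

-- B escapes in one pass over the characters with a lookup table instead of five sequential full-string replace passes (an alternative algorithm; no speed claim); return values proved equal.

-- ===== PORT A =====
-- five sequential replaces, in A's order
def escape_markup (text : Option String) : String :=
  match text with
  | none => ""
  | some s =>
    if s = "" then ""
    else
      -- the `isinstance` branch never fires: the argument is already a str
      let replacements : List (String × String) :=
        [("&", "&amp;"), ("<", "&lt;"), (">", "&gt;"), ("'", "&apos;"), ("\"", "&quot;")]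
      replacements.foldl (fun t (p : String × String) => PySem.Str.replace t p.1 p.2) s

-- ===== PORT B =====
-- single pass: per-character table lookup, pieces joined once
def escTable : PySem.Dict Char String :=
  PySem.Dict.ofList
    [('&', "&amp;"), ('<', "&lt;"), ('>', "&gt;"), ('\'', "&apos;"), ('"', "&quot;")]

def escape_markup_alt (text : Option String) : String :=
  match text with
  | none => ""
  | some s =>
    if s = "" then ""
    else
      let parts : List String := s.toList.map (fun ch => escTable.getD ch (String.ofList [ch]))
      PySem.Str.join "" parts

-- ===== PRECONDITION & SPEC =====
def Spec_escape_markup (text : Option String) (out : String) : Prop := out = escape_markup_alt text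
instance (text : Option String) (out : String) : Decidable (Spec_escape_markup text out) := by unfold Spec_escape_markup; infer_instance

-- ===== CLAIM (what is proved, stated in full; the proofs are below) =====
def Claim_equal_escape_markup : Prop := ∀ (text : Option String), Dom_escape_markup text → Spec_escape_markup text (escape_markup text)

-- ===== LEMMAS AND PROOFS =====

-- single-character substitution as a per-character map
def subst1 (a : Char) (new : List Char) (c : Char) : List Char :=
  if c = a then new else [c]

theorem replace_go_single (a : Char) (new : List Char) :
    ∀ (fuel : Nat) (l acc : List Char), l.length ≤ fuel →
      PySem.Chars.replace.go [a] new fuel l acc = acc.reverse ++ l.flatMap (subst1 a new) := by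
  intro fuel
  induction fuel with
  | zero =>
    intro l acc h
    have : l = [] := List.length_eq_zero_iff.mp (Nat.le_zero.mp h)
    subst this
    simp [PySem.Chars.replace.go]
  | succ n ih =>
    intro l acc h
    cases l with
    | nil => simp [PySem.Chars.replace.go]
    | cons c t =>
      simp only [PySem.Chars.replace.go]
      by_cases hc : c = a
      · subst hc
        rw [if_pos (by simp [List.isPrefixOf])]
        simp only [List.length_singleton, List.drop_succ_cons, List.drop_zero]
        rw [ih t (new.reverse ++ acc) (by simpa using Nat.le_of_succ_le_succ h)]
        simp [subst1]
      · rw [if_neg (by simp [List.isPrefixOf]; exact fun h' => hc h'.symm)]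
        rw [ih t (c :: acc) (by simpa using Nat.le_of_succ_le_succ h)]
        simp [subst1, hc]

theorem replace_single (a : Char) (new l : List Char) :
    PySem.Chars.replace l [a] new = l.flatMap (subst1 a new) := by
  rw [PySem.Chars.replace]
  rw [if_neg (by simp)]
  simpa using replace_go_single a new l.length l [] (le_refl _)

-- the combined one-pass escape of a single character
def escAll (c : Char) : List Char := (escTable.getD c (String.ofList [c])).toList

theorem chain_eq (cs : List Char) :
    ((((cs.flatMap (subst1 '&' "&amp;".toList)).flatMap (subst1 '<' "&lt;".toList)).flatMap
        (subst1 '>' "&gt;".toList)).flatMap (subst1 '\'' "&apos;".toList)).flatMap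
        (subst1 '"' "&quot;".toList) = cs.flatMap escAll := by
  induction cs with
  | nil => simp
  | cons c t ih =>
    simp only [List.flatMap_cons, List.flatMap_append] at *
    rw [ih]
    congr 1
    have ht : escTable.items =
        [('&', "&amp;"), ('<', "&lt;"), ('>', "&gt;"), ('\'', "&apos;"), ('"', "&quot;")] := by
      decide
    by_cases h1 : '&' = c
    · subst h1; decide
    by_cases h2 : '<' = c
    · subst h2; decide
    by_cases h3 : '>' = c
    · subst h3; decide
    by_cases h4 : '\'' = c
    · subst h4; decide
    by_cases h5 : '"' = c
    · subst h5; decide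
    · have e1 : ('&' == c) = false := by simp [h1]
      have e2 : ('<' == c) = false := by simp [h2]
      have e3 : ('>' == c) = false := by simp [h3]
      have e4 : ('\'' == c) = false := by simp [h4]
      have e5 : ('"' == c) = false := by simp [h5]
      simp [subst1, escAll, PySem.Dict.getD, PySem.Dict.get?, ht, List.find?,
        e1, e2, e3, e4, e5, Ne.symm h1, Ne.symm h2, Ne.symm h3, Ne.symm h4, Ne.symm h5]

theorem join_nil_flatten (parts : List (List Char)) :
    PySem.Chars.join [] parts = parts.flatten := by
  simp [PySem.Chars.join, List.intercalate]
  induction parts with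
  | nil => simp
  | cons p t ih => cases t <;> simp_all [List.intersperse]

-- ===== VERDICT (by name: the statement is the Claim_ definition above) =====
theorem escape_markup_spec : Claim_equal_escape_markup := by
  intro text _
  unfold Spec_escape_markup escape_markup escape_markup_alt
  match text with
  | none => rfl
  | some s =>
    by_cases hs : s = ""
    · simp [hs]
    · simp only [if_neg hs]
      apply String.toList_inj.mp
      simp only [List.foldl, PySem.Str.toList_replace, PySem.Str.toList_join]
      rw [show ("" : String).toList = [] from rfl, join_nil_flatten]
      rw [show ("&" : String).toList = ['&'] from rfl,
          show ("<" : String).toList = ['<'] from rfl,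
          show (">" : String).toList = ['>'] from rfl,
          show ("'" : String).toList = ['\''] from rfl,
          show ("\"" : String).toList = ['"'] from rfl]
      rw [replace_single, replace_single, replace_single, replace_single, replace_single]
      rw [chain_eq]
      simp only [List.flatMap_def, List.map_map]
      rfl
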